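-- pv_equiv track=rewrite | github.com/avataa-hq/avataa-inventory | app/services/grpc_service/grpc_utils.py | get_smallest_severity_value
-- ===== SOURCE A (Python) =====
-- def get_smallest_severity_value(severities: dict):
--     smallest_value = None
--     smallest_severity_name = None
--
--     for gradation, values in severities.items():
--         if "max" in values:
--             current_max = values["max"]
--             if current_max > 0 and (
--                 smallest_value is None or current_max < smallest_value
--             ):
--                 smallest_value = current_max
--                 smallest_severity_name = gradation
--
--         if "min" in values:
--             current_min = values["min"]
--             if current_min > 0 and (
--                 smallest_value is None or current_min < smallest_value
--             ):
--                 smallest_value = current_min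
--                 smallest_severity_name = gradation
--     return smallest_severity_name, smallest_value
-- ===== SOURCE B (Python) =====
-- def _entry_candidates(gradation, values):
--     out = []
--     if "max" in values and values["max"] > 0:
--         out.append((values["max"], gradation))
--     if "min" in values and values["min"] > 0:
--         out.append((values["min"], gradation))
--     return out
--
--
-- def get_smallest_severity_value(severities: dict):
--     candidates = []
--     for gradation, values in severities.items():
--         candidates += _entry_candidates(gradation, values)
--     best = min(candidates, key=lambda c: c[0], default=(None, None))
--     return (best[1], best[0])
-- ===== Notes on version B (the rewrite author's own statement) =====
-- stated objective: alternative
-- what changed: Replaced the interleaved running-minimum state machine by a materialize-then-reduce decomposition: first collect all positive (value, gradation) candidates in order, then take min with default.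
import Mathlib
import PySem

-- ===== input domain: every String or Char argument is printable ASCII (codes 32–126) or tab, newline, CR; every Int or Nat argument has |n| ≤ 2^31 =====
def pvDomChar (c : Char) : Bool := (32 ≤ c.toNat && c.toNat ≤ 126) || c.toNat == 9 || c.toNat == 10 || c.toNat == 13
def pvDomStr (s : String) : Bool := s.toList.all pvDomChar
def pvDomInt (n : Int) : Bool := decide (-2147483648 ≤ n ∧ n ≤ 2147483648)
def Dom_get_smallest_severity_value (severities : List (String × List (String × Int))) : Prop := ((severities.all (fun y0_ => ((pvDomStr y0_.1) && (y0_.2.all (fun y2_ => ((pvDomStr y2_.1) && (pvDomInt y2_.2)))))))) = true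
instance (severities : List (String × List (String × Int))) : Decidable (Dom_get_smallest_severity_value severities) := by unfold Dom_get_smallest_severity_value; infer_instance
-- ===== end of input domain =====

-- B collects all positive (value, gradation) candidates first and then takes a single min with default; same results, alternative decomposition.

-- ===== PORT A =====
-- one iteration of A's loop body over the running state (smallest_value, smallest_severity_name)
def stepA (st : Option Int × Option String) (gv : String × List (String × Int)) :
    Option Int × Option String :=
  let st1 :=
    match (PySem.Dict.mk gv.2).get? "max" with
    | some currentMax =>
        if currentMax > 0 ∧ (st.1 = none ∨ ∃ v, st.1 = some v ∧ currentMax < v) then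
          (some currentMax, some gv.1)
        else st
    | none => st
  match (PySem.Dict.mk gv.2).get? "min" with
  | some currentMin =>
      if currentMin > 0 ∧ (st1.1 = none ∨ ∃ v, st1.1 = some v ∧ currentMin < v) then
        (some currentMin, some gv.1)
      else st1
  | none => st1

def get_smallest_severity_value (severities : List (String × List (String × Int))) :
    Option String × Option Int :=
  let st := severities.foldl stepA (none, none)
  (st.2, st.1)

-- ===== PORT B =====
-- _entry_candidates from Source B
def entryCandidates (gradation : String) (values : List (String × Int)) : List (Int × String) :=
  let out :=
    match (PySem.Dict.mk values).get? "max" with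
    | some m => if m > 0 then [(m, gradation)] else []
    | none => []
  match (PySem.Dict.mk values).get? "min" with
  | some m => if m > 0 then out ++ [(m, gradation)] else out
  | none => out

def get_smallest_severity_value_alt (severities : List (String × List (String × Int))) :
    Option String × Option Int :=
  let candidates := severities.foldl (fun acc gv => acc ++ entryCandidates gv.1 gv.2) []
  match PySem.List.min? candidates (fun c => c.1) with
  | none => (none, none)
  | some best => (some best.2, some best.1)

-- ===== PRECONDITION & SPEC =====
def Spec_get_smallest_severity_value (severities : List (String × List (String × Int))) (out : Option String × Option Int) : Prop := out = get_smallest_severity_value_alt severities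
instance (severities : List (String × List (String × Int))) (out : Option String × Option Int) : Decidable (Spec_get_smallest_severity_value severities out) := by unfold Spec_get_smallest_severity_value; infer_instance

-- ===== CLAIM (what is proved, stated in full; the proofs are below) =====
def Claim_equal_get_smallest_severity_value : Prop := ∀ (severities : List (String × List (String × Int))), Dom_get_smallest_severity_value severities → Spec_get_smallest_severity_value severities (get_smallest_severity_value severities)

-- ===== LEMMAS AND PROOFS =====

-- the running-min fold underlying PySem.List.min? (key = first component)
def mstep (acc : Option (Int × String)) (x : Int × String) : Option (Int × String) :=
  match acc with
  | none => some x
  | some m => if x.1 < m.1 then some x else some m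

def mfold (acc : Option (Int × String)) (cs : List (Int × String)) : Option (Int × String) :=
  cs.foldl mstep acc

-- A's state as a function of the best candidate seen so far
def encode (m : Option (Int × String)) : Option Int × Option String :=
  match m with
  | none => (none, none)
  | some (v, g) => (some v, some g)

theorem min?_eq_mfold (cs : List (Int × String)) :
    PySem.List.min? cs (fun c => c.1) = mfold none cs := by
  simp only [PySem.List.min?, mfold]
  congr 1
  funext acc x
  cases acc <;> rfl

theorem mfold_append (m : Option (Int × String)) (cs ds : List (Int × String)) :
    mfold m (cs ++ ds) = mfold (mfold m cs) ds := by
  simp [mfold, List.foldl_append]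

theorem stepA_eq (m : Option (Int × String)) (gv : String × List (String × Int)) :
    stepA (encode m) gv = encode (mfold m (entryCandidates gv.1 gv.2)) := by
  rcases gv with ⟨g, values⟩
  simp only [stepA, entryCandidates]
  rcases hmax : (PySem.Dict.mk values).get? "max" with _ | cmax <;>
    rcases hmin : (PySem.Dict.mk values).get? "min" with _ | cmin <;>
    rcases m with _ | ⟨v, nm⟩ <;>
    simp only [encode, mfold, mstep, List.foldl] <;>
    split_ifs <;>
    (try simp_all [encode, mfold, mstep, List.foldl]) <;>
    (try simp only [if_neg (show ¬(0:Int) < cmax by omega)]) <;>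
    (try split_ifs) <;>
    (try simp_all) <;>
    (try split_ifs) <;>
    (try simp_all) <;>
    first
      | rfl
      | omega
      | (exfalso; omega)

theorem foldA_eq (severities : List (String × List (String × Int)))
    (m : Option (Int × String)) :
    severities.foldl stepA (encode m) =
      encode (mfold m (severities.flatMap (fun gv => entryCandidates gv.1 gv.2))) := by
  induction severities generalizing m with
  | nil => simp [mfold]
  | cons gv rest ih =>
      simp only [List.foldl, List.flatMap_cons, mfold_append]
      rw [stepA_eq, ih]

-- ===== VERDICT (by name: the statement is the Claim_ definition above) =====
theorem get_smallest_severity_value_spec : Claim_equal_get_smallest_severity_value := by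
  intro severities _
  show _ = _
  simp only [get_smallest_severity_value, get_smallest_severity_value_alt,
    PySem.List.foldl_append_eq_flatMap, List.nil_append, min?_eq_mfold]
  have h := foldA_eq severities none
  simp only [encode] at h
  rw [h]
  rcases hM : mfold none (severities.flatMap fun gv => entryCandidates gv.1 gv.2) with _ | ⟨v, g⟩ <;>
    simp [hM]
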